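-- pv_equiv track=rewrite | github.com/vaishnavis14/cs313e-hw0 | DNA.py | common_sequence
-- ===== SOURCE A (Python) =====
-- def common_sequence(shorter, longer, length):
--     #  An empty list of common sequences is made
--     common_sequences = []
--
--     #  The outer loop goes through the shorter sequence and the inner loop goes through the longer sequence.
--     #  Subsequences are compared from the inner and outer loop. If there is a common sequence, the sequence as added to the list of common_sequences.
--     #  The common sequences are returned.
--     for i in range((len(shorter) - (length) + 1)):
--         end = i + length
--         sequence_1 = shorter[i:end]
--         for j in range((len(longer) - (length) + 1)):
--             end = j + length
--             sequence_2 = longer[j:end]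
--             if (sequence_1 == sequence_2):
--                 common_sequences.append(sequence_1)
--     return common_sequences
-- ===== SOURCE B (Python) =====
-- def common_sequence(shorter, longer, length):
--     # Count each length-window of longer once, then emit per position of shorter.
--     counts = {}
--     for j in range(len(longer) - length + 1):
--         s = longer[j:j + length]
--         counts[s] = counts.get(s, 0) + 1
--     result = []
--     for i in range(len(shorter) - length + 1):
--         s = shorter[i:i + length]
--         result.extend([s] * counts.get(s, 0))
--     return result
-- ===== Notes on version B (the rewrite author's own statement) =====
-- stated objective: alternative
-- what changed: Replaces the nested position-by-position scan of longer for every window of shorter with a single pass that counts the windows of longer in a dict, then one pass over shorter emitting each window count-many times.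
import Mathlib
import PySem

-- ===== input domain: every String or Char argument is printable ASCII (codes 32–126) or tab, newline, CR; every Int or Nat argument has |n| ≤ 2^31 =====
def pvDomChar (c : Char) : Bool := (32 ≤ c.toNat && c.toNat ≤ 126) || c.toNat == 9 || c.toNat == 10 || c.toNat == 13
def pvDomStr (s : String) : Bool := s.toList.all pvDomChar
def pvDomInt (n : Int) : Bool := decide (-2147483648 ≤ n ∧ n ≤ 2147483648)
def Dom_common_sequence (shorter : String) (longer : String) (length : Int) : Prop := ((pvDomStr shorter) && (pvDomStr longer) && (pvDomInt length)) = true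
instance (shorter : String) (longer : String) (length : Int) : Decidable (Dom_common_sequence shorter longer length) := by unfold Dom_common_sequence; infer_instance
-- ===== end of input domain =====

-- ===== PORT A =====
-- B replaces A's nested scan with a one-pass window counter over longer, then one emitting pass over shorter.
def common_sequence (shorter : String) (longer : String) (length : Int) : List String :=
  (PySem.List.pyRange 0 (((shorter.toList.length : Int)) - length + 1) 1).foldl
    (fun common_sequences i =>
      let sequence_1 := PySem.List.slice shorter.toList (some i) (some (i + length))
      (PySem.List.pyRange 0 (((longer.toList.length : Int)) - length + 1) 1).foldl
        (fun common_sequences j =>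
          let sequence_2 := PySem.List.slice longer.toList (some j) (some (j + length))
          if sequence_1 = sequence_2 then common_sequences ++ [String.ofList sequence_1]
          else common_sequences)
        common_sequences)
    []

-- ===== PORT B =====
def common_sequence_alt (shorter : String) (longer : String) (length : Int) : List String :=
  let counts : PySem.Dict (List Char) Int :=
    (PySem.List.pyRange 0 (((longer.toList.length : Int)) - length + 1) 1).foldl
      (fun d j =>
        let s := PySem.List.slice longer.toList (some j) (some (j + length))
        d.insert s (d.getD s 0 + 1))
      PySem.Dict.empty
  (PySem.List.pyRange 0 (((shorter.toList.length : Int)) - length + 1) 1).foldl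
    (fun result i =>
      let s := PySem.List.slice shorter.toList (some i) (some (i + length))
      result ++ List.replicate (counts.getD s 0).toNat (String.ofList s))
    []

-- ===== PRECONDITION & SPEC =====
def Spec_common_sequence (shorter : String) (longer : String) (length : Int) (out : List String) : Prop := out = common_sequence_alt shorter longer length
instance (shorter : String) (longer : String) (length : Int) (out : List String) : Decidable (Spec_common_sequence shorter longer length out) := by unfold Spec_common_sequence; infer_instance

-- ===== CLAIM =====
def Claim_equal_common_sequence : Prop := ∀ (shorter : String) (longer : String) (length : Int), Dom_common_sequence shorter longer length → Spec_common_sequence shorter longer length (common_sequence shorter longer length)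

-- ===== LEMMAS AND PROOFS =====

-- B's counting loop: the final count of s is the initial one plus the number of hits f j = s.
lemma getD_count_loop (R : List Int) (f : Int → List Char)
    (d : PySem.Dict (List Char) Int) (s : List Char) :
    (R.foldl (fun d j => d.insert (f j) (d.getD (f j) 0 + 1)) d).getD s 0
      = d.getD s 0 + ((R.map f).count s : Int) := by
  induction R generalizing d with
  | nil => simp
  | cons h t ih =>
      rw [List.foldl_cons, ih, List.map_cons, List.count_cons]
      by_cases hs : f h = s
      · simp [hs, PySem.Dict.getD_insert_self]
        omega
      · have hs' : s ≠ f h := fun e => hs e.symm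
        simp [PySem.Dict.getD_insert, hs', hs]

-- A's inner scan appends one copy of y per position j with f j = s.
lemma inner_loop (R : List Int) (f : Int → List Char) (s : List Char)
    (y : String) (acc : List String) :
    R.foldl (fun a j => if s = f j then a ++ [y] else a) acc
      = acc ++ List.replicate ((R.map f).count s) y := by
  induction R generalizing acc with
  | nil => simp
  | cons h t ih =>
      rw [List.foldl_cons, List.map_cons, List.count_cons]
      by_cases hs : s = f h
      · subst hs
        simp [ih, List.replicate_succ]
      · simp [hs, ih, Ne.symm hs]

-- ===== VERDICT =====
theorem common_sequence_spec : Claim_equal_common_sequence := by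
  intro shorter longer length _
  unfold Spec_common_sequence
  simp only [common_sequence, common_sequence_alt]
  apply PySem.List.foldl_congr_mem
  intro acc i _
  rw [inner_loop _ (fun j => PySem.List.slice longer.toList (some j) (some (j + length))),
    getD_count_loop _ (fun j => PySem.List.slice longer.toList (some j) (some (j + length)))]
  simp
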